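-- pv_equiv track=rewrite | github.com/RyanWangZf/BioDSA | biodsa/tools/kegg/client.py | _parse_kegg_entry
-- ===== SOURCE A (Python) =====
-- from typing import Any, Dict, List, Optional, Union
--
-- def _parse_kegg_entry(text: str) -> Dict[str, Any]:
--     """Parse a KEGG entry in flat file format.
--
--     Args:
--         text: KEGG entry text
--
--     Returns:
--         Parsed entry as a dictionary
--     """
--     entry = {}
--     current_field = None
--     current_value = []
--
--     for line in text.split('\n'):
--         if not line.strip():
--             continue
--
--         # Check if this is a new field (starts with non-whitespace)
--         if line[0] != ' ':
--             # Save previous field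
--             if current_field:
--                 entry[current_field] = '\n'.join(current_value).strip()
--
--             # Parse new field
--             parts = line.split(None, 1)
--             current_field = parts[0]
--             current_value = [parts[1]] if len(parts) > 1 else []
--         else:
--             # Continuation of current field
--             if current_field:
--                 current_value.append(line.strip())
--
--     # Save last field
--     if current_field:
--         entry[current_field] = '\n'.join(current_value).strip()
--
--     return entry
-- ===== SOURCE B (Python) =====
-- def _parse_kegg_entry(text: str):
--     """Parse a KEGG entry in flat file format (block-grouping decomposition)."""
--     lines = [l for l in text.split('\n') if l.strip()]
--     n = len(lines)
--     # drop leading continuation lines (no field header seen yet)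
--     i = 0
--     while i < n and lines[i][0] == ' ':
--         i += 1
--     entry = {}
--     while i < n:
--         parts = lines[i].split(None, 1)
--         j = i + 1
--         while j < n and lines[j][0] == ' ':
--             j += 1
--         values = parts[1:] + [l.strip() for l in lines[i + 1:j]]
--         entry[parts[0]] = '\n'.join(values).strip()
--         i = j
--     return entry
-- ===== Notes on version B (the rewrite author's own statement) =====
-- stated objective: alternative
-- what changed: A's single stateful loop (current_field/current_value accumulators saved when the next header appears) is replaced by a block-grouping pass: drop blank lines, skip leading continuation lines, then consume each header line together with its following continuation lines as one block and insert it into the dict directly.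
import Mathlib
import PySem

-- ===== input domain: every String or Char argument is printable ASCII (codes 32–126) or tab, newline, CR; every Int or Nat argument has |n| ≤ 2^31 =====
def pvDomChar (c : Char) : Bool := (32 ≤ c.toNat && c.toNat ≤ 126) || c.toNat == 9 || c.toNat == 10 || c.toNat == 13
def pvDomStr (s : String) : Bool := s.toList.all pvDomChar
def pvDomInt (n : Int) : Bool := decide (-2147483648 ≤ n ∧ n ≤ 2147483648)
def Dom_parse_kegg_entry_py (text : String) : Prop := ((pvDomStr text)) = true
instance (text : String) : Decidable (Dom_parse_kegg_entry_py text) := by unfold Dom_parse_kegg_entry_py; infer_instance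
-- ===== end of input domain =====

-- B replaces A's stateful save-on-next-header loop by a block-grouping pass (skip leading
-- continuations, then consume each header together with its continuation lines); objective:
-- alternative decomposition, same asymptotic cost.

-- ===== PORT A =====
-- 'if current_field:' — Python truthiness of an Optional[str]
def pvTruthy (cf : Option String) : Bool :=
  match cf with
  | none => false
  | some f => f != ""

-- 'entry[current_field] = "\n".join(current_value).strip()' guarded by 'if current_field:'
def pvSaveField (entry : PySem.Dict String String) (cf : Option String) (cv : List String) :
    PySem.Dict String String :=
  if pvTruthy cf then entry.insert (cf.getD "") (PySem.Str.strip (PySem.Str.join "\n" cv)) else entry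

-- the 'for line in text.split("\n")' loop, state = (entry, current_field, current_value);
-- parts[0] is ported as headD "" (split(None,1) of a line with nonempty strip is never empty,
-- so Python's IndexError is unreachable); parts[1] as pyGet? with getD "" (same reason)
def pvALoop : List String → PySem.Dict String String → Option String → List String →
    PySem.Dict String String
  | [], entry, cf, cv => pvSaveField entry cf cv
  | l :: rest, entry, cf, cv =>
    if PySem.Str.strip l == "" then pvALoop rest entry cf cv
    else if PySem.Str.pyGet? l 0 != some ' ' then
      let parts := PySem.Str.split₀Max l 1
      pvALoop rest (pvSaveField entry cf cv) (some (parts.headD ""))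
        (if 1 < parts.length then [(PySem.List.pyGet? parts 1).getD ""] else [])
    else
      if pvTruthy cf then pvALoop rest entry cf (cv ++ [PySem.Str.strip l])
      else pvALoop rest entry cf cv

def parse_kegg_entry_py (text : String) : List (String × String) :=
  (pvALoop ((PySem.Str.split? text "\n").getD []) PySem.Dict.empty none []).items

-- ===== PORT B =====
def pvIsCont (l : String) : Bool := PySem.Str.pyGet? l 0 == some ' '
def pvNonBlank (l : String) : Bool := PySem.Str.strip l != ""

-- the outer 'while i < n' loop of B: one header line plus its continuation lines per step
def pvParseBlocks : List String → PySem.Dict String String → PySem.Dict String String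
  | [], entry => entry
  | l :: rest, entry =>
    let parts := PySem.Str.split₀Max l 1
    let values := parts.drop 1 ++ (rest.takeWhile pvIsCont).map PySem.Str.strip
    pvParseBlocks (rest.dropWhile pvIsCont)
      (entry.insert (parts.headD "") (PySem.Str.strip (PySem.Str.join "\n" values)))
  termination_by lines _ => lines.length
  decreasing_by
    simp only [List.length_cons]
    exact Nat.lt_succ_of_le (List.length_dropWhile_le _ _)

def parse_kegg_entry_py_alt (text : String) : List (String × String) :=
  let lines := ((PySem.Str.split? text "\n").getD []).filter pvNonBlank
  (pvParseBlocks (lines.dropWhile pvIsCont) PySem.Dict.empty).items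

-- ===== PRECONDITION & SPEC =====
def Spec_parse_kegg_entry_py (text : String) (out : List (String × String)) : Prop := out = parse_kegg_entry_py_alt text
instance (text : String) (out : List (String × String)) : Decidable (Spec_parse_kegg_entry_py text out) := by unfold Spec_parse_kegg_entry_py; infer_instance

-- ===== CLAIM (what is proved, stated in full; the proofs are below) =====
def Claim_equal_parse_kegg_entry_py : Prop := ∀ (text : String), Dom_parse_kegg_entry_py text → Spec_parse_kegg_entry_py text (parse_kegg_entry_py text)

-- ===== LEMMAS AND PROOFS =====

-- shape of line.split(None, 1) on a line with nonempty strip: one or two pieces, first nonempty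
lemma pv_chars_shape (cs : List Char) (h : PySem.Chars.strip cs ≠ []) :
    ∃ t, t ≠ [] ∧ (PySem.Chars.split₀Max cs 1 = [t] ∨ ∃ r, PySem.Chars.split₀Max cs 1 = [t, r]) := by
  have hls : cs.dropWhile PySem.Chars.isspace ≠ [] := by
    intro e
    exact h (by simp [PySem.Chars.strip, PySem.Chars.lstrip, e, PySem.Chars.rstrip])
  obtain ⟨c, t, hct⟩ : ∃ c t, cs.dropWhile PySem.Chars.isspace = c :: t := by
    cases hh : cs.dropWhile PySem.Chars.isspace with
    | nil => exact absurd hh hls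
    | cons c t => exact ⟨c, t, rfl⟩
  have hc : PySem.Chars.isspace c = false := by
    have h2 := List.head_dropWhile_not PySem.Chars.isspace hls
    simpa [hct] using h2
  have hcs : cs ≠ [] := by intro e; simp [e] at hct
  obtain ⟨k, hk⟩ : ∃ k, cs.length = k + 1 := ⟨cs.length - 1, by cases cs <;> simp_all⟩
  refine ⟨c :: t.takeWhile (fun x => !PySem.Chars.isspace x), by simp, ?_⟩
  rw [PySem.Chars.split₀Max]
  simp only [show ¬((1:Int) < 0) by norm_num, if_false, hk]
  rw [PySem.Chars.split₀Max.go]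
  simp only [hct, show Int.toNat 1 = 1 from rfl, List.dropWhile_cons, List.takeWhile_cons, hc,
    Bool.not_false, if_true, Nat.one_ne_zero, if_false]
  rw [PySem.Chars.split₀Max.go]
  cases hh : List.dropWhile PySem.Chars.isspace (List.dropWhile (fun c => !PySem.Chars.isspace c) t) with
  | nil => left; simp
  | cons a b => right; exact ⟨a :: b, by simp⟩

lemma pv_split2_shape (l : String) (h : pvNonBlank l = true) :
    ∃ t, t ≠ "" ∧ (PySem.Str.split₀Max l 1 = [t] ∨ ∃ r, PySem.Str.split₀Max l 1 = [t, r]) := by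
  have h' : PySem.Chars.strip l.toList ≠ [] := by
    intro e
    simp [pvNonBlank, PySem.Str.strip, e] at h
  obtain ⟨t, ht, hsh⟩ := pv_chars_shape l.toList h'
  refine ⟨String.ofList t, ?_, ?_⟩
  · intro e
    exact ht (by simpa using congrArg String.toList e)
  · rcases hsh with hsh | ⟨r, hsh⟩
    · left; simp [PySem.Str.split₀Max, hsh]
    · right; exact ⟨String.ofList r, by simp [PySem.Str.split₀Max, hsh]⟩

-- A's construction of the new current_value equals parts[1:]
lemma pv_cv_eq (l : String) (h : pvNonBlank l = true) :
    (if 1 < (PySem.Str.split₀Max l 1).length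
       then [(PySem.List.pyGet? (PySem.Str.split₀Max l 1) 1).getD ""] else [])
      = (PySem.Str.split₀Max l 1).drop 1 := by
  obtain ⟨t, _, hsh | ⟨r, hsh⟩⟩ := pv_split2_shape l h <;>
    simp [hsh, PySem.List.pyGet?, PySem.List.pyIdx?]

lemma pv_head_ne (l : String) (h : pvNonBlank l = true) :
    (PySem.Str.split₀Max l 1).headD "" ≠ "" := by
  obtain ⟨t, ht, hsh | ⟨r, hsh⟩⟩ := pv_split2_shape l h <;> simpa [hsh] using ht

-- A's blank-line 'continue' is B's filter
lemma pvALoop_filter (lines : List String) :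
    ∀ entry cf cv, pvALoop lines entry cf cv = pvALoop (lines.filter pvNonBlank) entry cf cv := by
  induction lines with
  | nil => intro entry cf cv; rfl
  | cons l rest ih =>
    intro entry cf cv
    by_cases hb : PySem.Str.strip l == ""
    · have : pvNonBlank l = false := by simp [pvNonBlank]; simpa using hb
      simp [pvALoop, hb, this, ih]
    · have : pvNonBlank l = true := by simp [pvNonBlank]; simpa using hb
      simp only [pvALoop, hb, if_false, List.filter_cons, this, if_true, Bool.false_eq_true]
      split_ifs <;> simp [ih]

-- main invariant, pending field open: A's remaining loop saves the pending block and
-- continues as B's block loop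
lemma pvALoop_pend (lines : List String) (hnb : ∀ l ∈ lines, pvNonBlank l = true) :
    ∀ entry f cv, f ≠ "" →
      pvALoop lines entry (some f) cv
        = pvParseBlocks (lines.dropWhile pvIsCont)
            (entry.insert f (PySem.Str.strip (PySem.Str.join "\n"
              (cv ++ (lines.takeWhile pvIsCont).map PySem.Str.strip)))) := by
  induction lines with
  | nil =>
    intro entry f cv hf
    simp [pvALoop, pvSaveField, pvTruthy, hf, pvParseBlocks]
  | cons l rest ih =>
    intro entry f cv hf
    have hl : pvNonBlank l = true := hnb l (List.mem_cons_self ..)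
    have hrest : ∀ x ∈ rest, pvNonBlank x = true := fun x hx => hnb x (List.mem_cons_of_mem _ hx)
    have hb : (PySem.Str.strip l == "") = false := by
      simpa [pvNonBlank] using hl
    by_cases hcont : pvIsCont l = true
    · have hhead : (PySem.Str.pyGet? l 0 != some ' ') = false := by
        simpa [pvIsCont] using hcont
      rw [pvALoop]
      simp only [hb, Bool.false_eq_true, if_false]
      rw [ih hrest entry f (cv ++ [PySem.Str.strip l]) hf]
      simp only [List.dropWhile_cons, List.takeWhile_cons, hcont, if_true, List.map_cons,
        List.append_assoc, List.singleton_append]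
      have hg : PySem.List.pyGet? l.toList 0 = some ' ' := by simpa [pvIsCont] using hcont
      simp [hg]
      intro hfalse
      simp [pvTruthy, hf] at hfalse
    · have hhead : (PySem.Str.pyGet? l 0 != some ' ') = true := by
        simp only [pvIsCont, beq_iff_eq] at hcont
        simpa using hcont
      have hcont' : pvIsCont l = false := by simpa using hcont
      rw [pvALoop]
      simp only [hb, Bool.false_eq_true, if_false, hhead, if_true]
      rw [ih hrest _ _ _ (pv_head_ne l hl)]
      rw [List.dropWhile_cons_of_neg (by simp [hcont']),
        List.takeWhile_cons_of_neg (by simp [hcont'])]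
      rw [pvParseBlocks]
      simp only [pv_cv_eq l hl, pvSaveField, pvTruthy]
      simp
      simp [hf]

-- before the first header: A ignores continuation lines, B drops them
lemma pvALoop_none (lines : List String) (hnb : ∀ l ∈ lines, pvNonBlank l = true) :
    ∀ entry cv, pvALoop lines entry none cv = pvParseBlocks (lines.dropWhile pvIsCont) entry := by
  induction lines with
  | nil => intro entry cv; simp [pvALoop, pvSaveField, pvTruthy, pvParseBlocks]
  | cons l rest ih =>
    intro entry cv
    have hl : pvNonBlank l = true := hnb l (List.mem_cons_self ..)
    have hrest : ∀ x ∈ rest, pvNonBlank x = true := fun x hx => hnb x (List.mem_cons_of_mem _ hx)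
    have hb : (PySem.Str.strip l == "") = false := by simpa [pvNonBlank] using hl
    by_cases hcont : pvIsCont l = true
    · have hhead : (PySem.Str.pyGet? l 0 != some ' ') = false := by
        simpa [pvIsCont] using hcont
      rw [pvALoop]
      simp only [hb, Bool.false_eq_true, if_false, hhead, pvTruthy]
      rw [ih hrest entry cv, List.dropWhile_cons_of_pos (by simpa using hcont)]
    · have hhead : (PySem.Str.pyGet? l 0 != some ' ') = true := by
        simp only [pvIsCont, beq_iff_eq] at hcont
        simpa using hcont
      have hcont' : pvIsCont l = false := by simpa using hcont
      rw [pvALoop]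
      simp only [hb, Bool.false_eq_true, if_false, hhead, if_true]
      rw [pvALoop_pend rest hrest _ _ _ (pv_head_ne l hl)]
      rw [List.dropWhile_cons_of_neg (by simp [hcont'])]
      rw [pvParseBlocks]
      simp only [pv_cv_eq l hl, pvSaveField, pvTruthy]
      simp

-- ===== VERDICT (by name: the statement is the Claim_ definition above) =====
theorem parse_kegg_entry_py_spec : Claim_equal_parse_kegg_entry_py := by
  intro text _
  show _ = _
  unfold parse_kegg_entry_py parse_kegg_entry_py_alt
  rw [pvALoop_filter, pvALoop_none _ (fun l hl => (List.mem_filter.mp hl).2)]
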